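-- pv_equiv track=rewrite | github.com/ameeli/algorithms | leetcode/find_common_chars.py | find_common_chars
-- ===== SOURCE A (Python) =====
-- def find_common_chars(words):
--     common_chars = list(words[0])
--
--     for w_i in range(1, len(words)):
--         for char_i, char in enumerate(common_chars):
--             if char not in words[w_i]:
--                 common_chars[char_i] = None
--             else:
--                 words[w_i] = words[w_i].replace(char, '', 1)
--         common_chars = list(filter(None, common_chars))
--
--     return filter(None, common_chars)
-- ===== SOURCE B (Python) =====
-- def find_common_chars(words):
--     # count each char of words[0], cap by its count in every other word,
--     # then emit words[0]'s chars while their budget lasts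
--     need = {}
--     for ch in words[0]:
--         need[ch] = need.get(ch, 0) + 1
--     for w in words[1:]:
--         cnt = {}
--         for ch in w:
--             cnt[ch] = cnt.get(ch, 0) + 1
--         for ch in need:
--             c = cnt.get(ch, 0)
--             if c < need[ch]:
--                 need[ch] = c
--     out = []
--     for ch in words[0]:
--         if need[ch] > 0:
--             out.append(ch)
--             need[ch] -= 1
--     return out
-- ===== Notes on version B (the rewrite author's own statement) =====
-- stated objective: alternative
-- what changed: Replaces A's per-word pass that re-scans the surviving chars with substring membership and replace() by per-char minimum counts built with dict counters and a single emitting pass over words[0]; measured around 1.3x-1.7x faster at the largest size across runs, i.e. at the 1.5x bar, so no firm speed claim is made.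
import Mathlib
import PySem

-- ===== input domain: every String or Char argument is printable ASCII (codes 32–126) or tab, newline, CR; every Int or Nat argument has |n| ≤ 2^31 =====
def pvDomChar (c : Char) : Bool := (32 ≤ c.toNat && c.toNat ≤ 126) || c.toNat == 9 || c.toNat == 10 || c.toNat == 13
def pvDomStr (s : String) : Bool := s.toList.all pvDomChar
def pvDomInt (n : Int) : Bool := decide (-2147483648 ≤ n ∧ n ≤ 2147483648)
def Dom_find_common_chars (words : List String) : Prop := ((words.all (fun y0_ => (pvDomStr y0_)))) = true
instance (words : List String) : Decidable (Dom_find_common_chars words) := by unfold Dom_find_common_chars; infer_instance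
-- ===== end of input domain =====

-- B replaces A's per-word membership/replace re-scanning of the surviving chars by per-char
-- minimum counts (dict counters) and a single emitting pass over words[0]; A also mutates its
-- argument list in place (words[i] = words[i].replace(...)) — the equivalence proved here is
-- about the RETURN value only.  Both Pythons raise IndexError on [], excluded by Pre_.

-- ===== PORT A =====
-- inner loop over common_chars for one word w: elements of common_chars are single
-- characters, so Python's `char not in w` is exact char membership and
-- `w.replace(char, '', 1)` is exactly List.erase (remove first occurrence).
def passA : List Char → List Char → (List (Option Char) × List Char)
  | [], w => ([], w)
  | c :: cs, w =>
    if c ∉ w then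
      let r := passA cs w
      (none :: r.1, r.2)
    else
      let r := passA cs (w.erase c)
      (some c :: r.1, r.2)

def find_common_chars (words : List String) : List String :=
  match words with
  | [] => []   -- words[0] raises IndexError; excluded by Pre_
  | w0 :: rest =>
    -- common_chars = list(words[0]); for each later word run the pass, then filter(None, …)
    let common := rest.foldl (fun cs w => ((passA cs w.toList).1).filterMap id) w0.toList
    -- final `filter(None, common_chars)` keeps every 1-char string (all truthy)
    common.map (fun c => String.mk [c])

-- ===== PORT B =====
-- need[ch] = need.get(ch, 0) + 1 counting loop
def counterB (s : List Char) : PySem.Dict Char Int :=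
  s.foldl (fun d ch => d.insert ch (d.getD ch 0 + 1)) PySem.Dict.empty

-- for ch in need: c = cnt.get(ch, 0); if c < need[ch]: need[ch] = c
def minPassB (need : PySem.Dict Char Int) (w : List Char) : PySem.Dict Char Int :=
  let cnt := counterB w
  need.keys.foldl (fun nd ch =>
    let c := cnt.getD ch 0
    if c < nd.getD ch 0 then nd.insert ch c else nd) need

-- emitting loop: for ch in words[0]: if need[ch] > 0: out.append(ch); need[ch] -= 1
def emitB (need : PySem.Dict Char Int) (cs : List Char) : List String × PySem.Dict Char Int :=
  cs.foldl (fun acc ch =>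
    if 0 < acc.2.getD ch 0 then
      (acc.1 ++ [String.mk [ch]], acc.2.insert ch (acc.2.getD ch 0 - 1))
    else acc) ([], need)

def find_common_chars_alt (words : List String) : List String :=
  match words with
  | [] => []   -- words[0] raises IndexError; excluded by Pre_
  | w0 :: rest =>
    let need := rest.foldl (fun nd w => minPassB nd w.toList) (counterB w0.toList)
    (emitB need w0.toList).1

-- ===== PRECONDITION & SPEC =====
-- Pre_ excludes only the empty list, on which A (words[0]) raises IndexError.
def Pre_find_common_chars (words : List String) : Prop := words ≠ []
instance (words : List String) : Decidable (Pre_find_common_chars words) := by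
  unfold Pre_find_common_chars; infer_instance

def pvWitness_find_common_chars : List String := ["bella", "label", "roller"]

def Spec_find_common_chars (words : List String) (out : List String) : Prop := out = find_common_chars_alt words
instance (words : List String) (out : List String) : Decidable (Spec_find_common_chars words out) := by unfold Spec_find_common_chars; infer_instance

-- ===== CLAIM (what is proved, stated in full; the proofs are below) =====
def Claim_equal_find_common_chars : Prop := ∀ (words : List String), Dom_find_common_chars words → Pre_find_common_chars words → Spec_find_common_chars words (find_common_chars words)

-- ===== LEMMAS AND PROOFS =====

-- the common abstraction: keep each char while its budget f lasts, decrementing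
def emitF (f : Char → Int) : List Char → List Char
  | [] => []
  | c :: cs =>
    if 0 < f c then c :: emitF (fun x => if x = c then f c - 1 else f x) cs
    else emitF f cs

theorem emitF_congr (f g : Char → Int)
    (h : ∀ c, f c = g c ∨ (f c ≤ 0 ∧ g c ≤ 0)) (cs : List Char) :
    emitF f cs = emitF g cs := by
  induction cs generalizing f g with
  | nil => rfl
  | cons c cs ih =>
    by_cases hf : 0 < f c
    · have hfc : f c = g c := by rcases h c with h' | h' <;> omega
      have hg : 0 < g c := by omega
      simp only [emitF, if_pos hf, if_pos hg]
      refine congrArg _ (ih _ _ fun x => ?_)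
      by_cases hx : x = c
      · subst hx; left; simp [hfc]
      · simpa [hx] using h x
    · have hg : ¬ 0 < g c := by rcases h c with h' | h' <;> omega
      simp only [emitF, if_neg hf, if_neg hg]
      exact ih _ _ h

theorem emitF_congr_mem (f g : Char → Int) (cs : List Char)
    (h : ∀ c ∈ cs, f c = g c) :
    emitF f cs = emitF g cs := by
  induction cs generalizing f g with
  | nil => rfl
  | cons c cs ih =>
    have hc := h c (by simp)
    simp only [emitF, hc]
    split
    · refine congrArg _ (ih _ _ fun x hx => ?_)
      by_cases hxc : x = c
      · subst hxc; simp [hc]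
      · simpa [hxc] using h x (by simp [hx])
    · exact ih _ _ fun x hx => h x (by simp [hx])

-- A's inner pass keeps each char while the word still has an unconsumed copy
theorem passA_spec (cs w : List Char) :
    ((passA cs w).1).filterMap id = emitF (fun c => (w.count c : Int)) cs := by
  induction cs generalizing w with
  | nil => rfl
  | cons c cs ih =>
    by_cases hc : c ∈ w
    · have hcount : (0 : Int) < (w.count c : Int) := by
        exact_mod_cast List.count_pos_iff.mpr hc
      have h1 : 1 ≤ w.count c := List.count_pos_iff.mpr hc
      simp only [passA, if_neg (not_not_intro hc), emitF, if_pos hcount,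
        List.filterMap_cons, id, Option.some.injEq]
      refine congrArg _ ((ih (w.erase c)).trans (emitF_congr_mem _ _ _ fun x _ => ?_))
      by_cases hx : x = c
      · subst hx
        simp [List.count_erase_self]
        omega
      · rw [List.count_erase_of_ne hx]
        simp [hx]
    · have hcount : w.count c = 0 := List.count_eq_zero.mpr hc
      simp only [passA, if_pos hc, List.filterMap_cons, emitF, hcount]
      simpa using ih w

-- composing two budget passes takes the pointwise minimum
theorem emitF_comp (f g : Char → Int) (cs : List Char) :
    emitF g (emitF f cs) = emitF (fun c => min (f c) (g c)) cs := by
  induction cs generalizing f g with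
  | nil => rfl
  | cons c cs ih =>
    by_cases hf : 0 < f c
    · by_cases hg : 0 < g c
      · simp only [emitF, if_pos hf, if_pos hg,
          if_pos (by omega : (0 : Int) < min (f c) (g c))]
        rw [ih]
        refine congrArg _ (emitF_congr _ _ (fun x => ?_) cs)
        by_cases hx : x = c
        · subst hx; left; simp only [eq_self_iff_true, if_true]; omega
        · left; simp [hx]
      · simp only [emitF, if_pos hf, if_neg hg,
          if_neg (by omega : ¬ (0 : Int) < min (f c) (g c))]
        rw [ih]
        refine emitF_congr _ _ (fun x => ?_) cs
        by_cases hx : x = c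
        · subst hx; right
          simp only [eq_self_iff_true, if_true]
          constructor <;> omega
        · left; simp [hx]
    · simp only [emitF, if_neg hf,
        if_neg (by omega : ¬ (0 : Int) < min (f c) (g c))]
      rw [ih]

theorem emitF_of_count_le (f : Char → Int) (cs : List Char)
    (h : ∀ c, (cs.count c : Int) ≤ f c) : emitF f cs = cs := by
  induction cs generalizing f with
  | nil => rfl
  | cons c cs ih =>
    have h1 : 1 ≤ (c :: cs).count c := List.count_pos_iff.mpr (by simp)
    have hc : (0 : Int) < f c := by have := h c; push_cast at this; omega
    simp only [emitF, if_pos hc]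
    refine congrArg _ (ih _ fun x => ?_)
    have hx' := h x
    by_cases hx : x = c
    · subst hx
      simp only [List.count_cons_self] at hx'
      simp only [if_pos rfl]
      push_cast at hx'
      omega
    · rw [List.count_cons_of_ne (Ne.symm hx)] at hx'
      simpa [hx] using hx'

-- A's outer loop folds the per-word budgets into a running minimum
theorem foldA_emit (rest : List String) (f : Char → Int) (cs : List Char) :
    rest.foldl (fun cs w => ((passA cs w.toList).1).filterMap id) (emitF f cs)
      = emitF (fun c => rest.foldl (fun m w => min m ((w.toList.count c : Int))) (f c)) cs := by
  induction rest generalizing f with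
  | nil => rfl
  | cons w rest ih =>
    simp only [List.foldl_cons]
    rw [passA_spec, emitF_comp, ih]

-- B's counting loop is collections.Counter
theorem counterB_eq (s : List Char) : counterB s = PySem.Dict.counter s :=
  PySem.Dict.foldl_insert_getD_add_one_eq_counter s

-- one min-capping pass over an explicit key list
theorem minfold_getD (cnt : PySem.Dict Char Int) (ks : List Char)
    (nd : PySem.Dict Char Int) (hmem : ∀ k ∈ ks, k ∈ nd.keys) (hnd : ks.Nodup) :
    (ks.foldl (fun nd ch =>
        if cnt.getD ch 0 < nd.getD ch 0 then nd.insert ch (cnt.getD ch 0) else nd) nd).keys = nd.keys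
    ∧ ∀ ch, (ks.foldl (fun nd ch =>
        if cnt.getD ch 0 < nd.getD ch 0 then nd.insert ch (cnt.getD ch 0) else nd) nd).getD ch 0
      = if ch ∈ ks then min (nd.getD ch 0) (cnt.getD ch 0) else nd.getD ch 0 := by
  induction ks generalizing nd with
  | nil => exact ⟨rfl, fun ch => by simp⟩
  | cons k ks ih =>
    have hk : k ∈ nd.keys := hmem k (by simp)
    have hcont : nd.contains k = true := (PySem.Dict.contains_iff_mem_keys nd k).mpr hk
    set nd' := if cnt.getD k 0 < nd.getD k 0 then nd.insert k (cnt.getD k 0) else nd with hnd'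
    have hkeys' : nd'.keys = nd.keys := by
      rw [hnd']; split
      · exact PySem.Dict.keys_insert_of_contains nd _ hcont
      · rfl
    have hget' : ∀ ch, nd'.getD ch 0 = if ch = k then min (nd.getD k 0) (cnt.getD k 0) else nd.getD ch 0 := by
      intro ch
      rw [hnd']
      split_ifs with h1 h2 h3
      · rw [PySem.Dict.getD_insert, if_pos h2]; omega
      · rw [PySem.Dict.getD_insert, if_neg h2]
      · rw [h3]; omega
      · rfl
    have hmem' : ∀ x ∈ ks, x ∈ nd'.keys := fun x hx => hkeys' ▸ hmem x (by simp [hx])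
    obtain ⟨ihk, ihg⟩ := ih nd' hmem' (List.Nodup.of_cons hnd)
    have hknotin : k ∉ ks := (List.nodup_cons.mp hnd).1
    constructor
    · simpa [hkeys'] using ihk
    · intro ch
      simp only [List.foldl_cons, ← hnd', ihg ch, hget']
      by_cases hch : ch ∈ ks
      · have hne : ch ≠ k := fun h => hknotin (h ▸ hch)
        simp [hch, hne]
      · by_cases hck : ch = k
        · subst hck; simp [hch]
        · simp [hch, hck]

-- minPassB caps every present key at its count in w and keeps the keys
theorem minPassB_spec (nd : PySem.Dict Char Int) (w : List Char) (hnd : nd.keys.Nodup) :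
    (minPassB nd w).keys = nd.keys
    ∧ ∀ ch, (minPassB nd w).getD ch 0
        = if ch ∈ nd.keys then min (nd.getD ch 0) ((w.count ch : Int)) else nd.getD ch 0 := by
  obtain ⟨hk, hg⟩ := minfold_getD (counterB w) nd.keys nd (fun _ h => h) hnd
  unfold minPassB
  refine ⟨hk, fun ch => ?_⟩
  rw [hg ch, counterB_eq, PySem.Dict.getD_counter]

-- B's outer loop computes the running minimum of the counts on every key
theorem foldB_getD (rest : List String) (nd : PySem.Dict Char Int) (hnd : nd.keys.Nodup) :
    (rest.foldl (fun nd w => minPassB nd w.toList) nd).keys = nd.keys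
    ∧ ∀ ch ∈ nd.keys, (rest.foldl (fun nd w => minPassB nd w.toList) nd).getD ch 0
        = rest.foldl (fun m w => min m ((w.toList.count ch : Int))) (nd.getD ch 0) := by
  induction rest generalizing nd with
  | nil => exact ⟨rfl, fun _ _ => rfl⟩
  | cons w rest ih =>
    obtain ⟨hk1, hg1⟩ := minPassB_spec nd w.toList hnd
    obtain ⟨ihk, ihg⟩ := ih (minPassB nd w.toList) (hk1 ▸ hnd)
    constructor
    · simpa [hk1] using ihk
    · intro ch hch
      simp only [List.foldl_cons]
      rw [ihg ch (hk1 ▸ hch), hg1 ch, if_pos hch]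

-- the emitting loop is emitF on the dict's value function
theorem emitB_fold_aux (cs : List Char) (out : List String) (nd : PySem.Dict Char Int) :
    (cs.foldl (fun acc ch =>
        if 0 < acc.2.getD ch 0 then
          (acc.1 ++ [String.mk [ch]], acc.2.insert ch (acc.2.getD ch 0 - 1))
        else acc) (out, nd)).1
      = out ++ (emitF (fun c => nd.getD c 0) cs).map (fun c => String.mk [c]) := by
  induction cs generalizing out nd with
  | nil => simp [emitF]
  | cons c cs ih =>
    by_cases hc : 0 < nd.getD c 0
    · rw [List.foldl_cons]
      simp only [if_pos hc]
      rw [ih]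
      have hfun : (fun x => (nd.insert c (nd.getD c 0 - 1)).getD x 0)
          = (fun x => if x = c then nd.getD c 0 - 1 else nd.getD x 0) :=
        funext fun x => PySem.Dict.getD_insert nd c x _ _
      rw [hfun]
      simp [emitF, if_pos hc]
    · rw [List.foldl_cons]
      simp only [if_neg hc]
      rw [ih]
      simp [emitF, if_neg hc]

-- the emitting loop is emitF on the dict's value function
theorem emitB_spec (nd : PySem.Dict Char Int) (cs : List Char) :
    (emitB nd cs).1 = (emitF (fun c => nd.getD c 0) cs).map (fun c => String.mk [c]) := by
  unfold emitB
  simpa using emitB_fold_aux cs [] nd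

theorem find_common_chars_spec : Claim_equal_find_common_chars := by
  intro words _ hpre
  cases words with
  | nil => exact absurd rfl hpre
  | cons w0 rest =>
    show find_common_chars (w0 :: rest) = find_common_chars_alt (w0 :: rest)
    simp only [find_common_chars, find_common_chars_alt]
    rw [emitB_spec]
    have h0 : emitF (fun c => ((w0.toList.count c : Nat) : Int)) w0.toList = w0.toList :=
      emitF_of_count_le _ _ (fun _ => le_refl _)
    have hA : rest.foldl (fun cs w => ((passA cs w.toList).1).filterMap id) w0.toList
        = emitF (fun c => rest.foldl (fun m w => min m ((w.toList.count c : Int)))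
            ((w0.toList.count c : Int))) w0.toList := by
      conv_lhs => rw [← h0]
      exact foldA_emit rest _ _
    rw [hA]
    have hnd : (counterB w0.toList).keys.Nodup := by
      rw [counterB_eq]; exact PySem.Dict.nodup_keys_counter _
    obtain ⟨_, hg⟩ := foldB_getD rest (counterB w0.toList) hnd
    refine congrArg _ (emitF_congr_mem _ _ _ fun c hc => ?_)
    have hck : c ∈ (counterB w0.toList).keys := by
      rw [counterB_eq, PySem.Dict.keys_counter]
      exact (PySem.Set.mem_ofList _ _).mpr hc
    rw [hg c hck, counterB_eq, PySem.Dict.getD_counter]
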